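-- pv_equiv track=rewrite | github.com/denisangel2k2/UBB | Year 1/Semester 1/Fundamentals of Programming/LAB 3/Lab3.py | listaTrei
-- ===== SOURCE A (Python) =====
-- def listaTrei(lista):
--     """
--     Returneaza secventa de lungime maximala astfel incat din oricare 3 elemente
--     consecutive, cel putin unul se repeta
--     input: lista de numere naturale
--     output: secventa - lista de numere naturale
--     """
--     if (len(lista)<3):
--         return None
--
--     lungime=2
--     lungime_maxima=0
--     index_start=0
--     index_stop=1
--     indexs=0
--     indexo=1
--     ans=[]
--     for i in range(2,len(lista),1):
--         #if (lista[i]==lista[i-1] and lista[i]!=lista[i-2]) or (lista[i]!=lista[i-1] and lista[i]==lista[i-2]) or (lista[i-1]==lista[i-2]):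
--         if lista[i]==lista[i-1] or lista[i]==lista[i-2] or lista[i-1]==lista[i-2]:
--             lungime+=1
--             indexo=i
--             if lungime>lungime_maxima:
--                 index_start=indexs
--                 index_stop=indexo
--                 lungime_maxima=lungime
--         else:
--             lungime=2
--             indexs=i-1
--             indexo=i
--
--     if index_start==-1 and index_stop==-1:
--         index_start=indexs
--         index_stop=indexo
--
--     for i in range(index_start, index_stop+1,1):
--         ans.append(lista[i])
--
--     if (len(ans)<3):
--         return None
--
--     return ans
-- ===== SOURCE B (Python) =====
-- def listaTrei(lista):
--     """
--     Returneaza secventa de lungime maximala astfel incat din oricare 3 elemente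
--     consecutive, cel putin unul se repeta
--     input: lista de numere naturale
--     output: secventa - lista de numere naturale
--     """
--     n = len(lista)
--     if n < 3:
--         return None
--     # ok[j] says whether the window lista[j], lista[j+1], lista[j+2] contains a repeat
--     ok = [lista[i] == lista[i - 1] or lista[i] == lista[i - 2] or lista[i - 1] == lista[i - 2]
--           for i in range(2, n)]
--     # collect the maximal runs of consecutive True values as (start, length) pairs
--     runs = []
--     start = None
--     for j, flag in enumerate(ok):
--         if flag:
--             if start is None:
--                 start = j
--         else:
--             if start is not None:
--                 runs.append((start, j - start))
--                 start = None
--     if start is not None: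
--         runs.append((start, len(ok) - start))
--     # earliest run of maximum length (strict > keeps the first)
--     best = None
--     for r in runs:
--         if best is None or r[1] > best[1]:
--             best = r
--     if best is None:
--         return None
--     p, L = best
--     return lista[p:p + L + 2]
-- ===== Notes on version B (the rewrite author's own statement) =====
-- stated objective: simpler
-- what changed: Replaces A's single pass with six interleaved state variables by a clean decomposition: build a boolean table ok[j] for each 3-window, collect maximal runs of True as (start,length) pairs, pick the earliest longest run, and return the corresponding slice.
import Mathlib
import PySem

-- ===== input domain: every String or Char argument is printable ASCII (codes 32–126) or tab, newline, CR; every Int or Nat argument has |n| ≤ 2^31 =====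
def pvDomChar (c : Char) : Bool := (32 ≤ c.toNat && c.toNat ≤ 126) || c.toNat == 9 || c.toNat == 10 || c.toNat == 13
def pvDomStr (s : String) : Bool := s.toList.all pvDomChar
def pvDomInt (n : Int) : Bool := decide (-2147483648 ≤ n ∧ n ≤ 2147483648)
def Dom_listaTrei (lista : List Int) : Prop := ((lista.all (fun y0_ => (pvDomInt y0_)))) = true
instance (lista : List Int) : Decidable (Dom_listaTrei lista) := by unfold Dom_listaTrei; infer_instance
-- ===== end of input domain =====

-- B replaces A's one-pass six-variable scan by a boolean window table + run extraction + earliest-longest run; same O(n) cost, simpler decomposition.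

-- ===== PORT A =====
-- loop body of A's single for-loop; state = (lungime, lungime_maxima, index_start, index_stop, indexs, indexo)
-- (the indices i, i-1, i-2 are always in range when the loop runs, so pyGetD with default 0 is exact here)
def listaTreiStep (lista : List Int) (st : Int × Int × Int × Int × Int × Int) (i : Int) :
    Int × Int × Int × Int × Int × Int :=
  match st with
  | (lg, ml, ist, isp, ixs, _ixo) =>
    if PySem.List.pyGetD lista i 0 = PySem.List.pyGetD lista (i-1) 0 ∨
       PySem.List.pyGetD lista i 0 = PySem.List.pyGetD lista (i-2) 0 ∨
       PySem.List.pyGetD lista (i-1) 0 = PySem.List.pyGetD lista (i-2) 0 then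
      if lg + 1 > ml then (lg + 1, lg + 1, ixs, i, ixs, i)
      else (lg + 1, ml, ist, isp, ixs, i)
    else (2, ml, ist, isp, i - 1, i)

def listaTrei (lista : List Int) : Option (List Int) :=
  if lista.length < 3 then none
  else
    match (PySem.List.pyRange 2 (lista.length : Int) 1).foldl (listaTreiStep lista) (2, 0, 0, 1, 0, 1) with
    | (_lg, _ml, ist, isp, ixs, ixo) =>
      let p : Int × Int := if ist = -1 ∧ isp = -1 then (ixs, ixo) else (ist, isp)
      let ans : List Int :=
        (PySem.List.pyRange p.1 (p.2 + 1) 1).foldl (fun acc i => acc ++ [PySem.List.pyGetD lista i 0]) []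
      if ans.length < 3 then none else some ans

-- ===== PORT B =====
-- B's run-collection loop body; state = (runs collected so far, start of the current open run)
def listaTreiAltStep (st : List (Int × Int) × Option Int) (jf : Int × Bool) :
    List (Int × Int) × Option Int :=
  if jf.2 then
    match st.2 with
    | none => (st.1, some jf.1)
    | some _ => st
  else
    match st.2 with
    | some s => (st.1 ++ [(s, jf.1 - s)], none)
    | none => st

def listaTrei_alt (lista : List Int) : Option (List Int) :=
  let n := lista.length
  if n < 3 then none
  else
    let ok : List Bool := (PySem.List.pyRange 2 (n : Int) 1).map (fun i =>
      decide (PySem.List.pyGetD lista i 0 = PySem.List.pyGetD lista (i-1) 0 ∨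
              PySem.List.pyGetD lista i 0 = PySem.List.pyGetD lista (i-2) 0 ∨
              PySem.List.pyGetD lista (i-1) 0 = PySem.List.pyGetD lista (i-2) 0))
    let rs := (PySem.List.enumerate ok 0).foldl listaTreiAltStep ([], none)
    let runs : List (Int × Int) :=
      match rs.2 with
      | some s => rs.1 ++ [(s, (ok.length : Int) - s)]
      | none => rs.1
    let best : Option (Int × Int) := runs.foldl (fun b r =>
      match b with
      | none => some r
      | some b' => if r.2 > b'.2 then some r else some b') none
    match best with
    | none => none
    | some (p, L) => some (PySem.List.slice lista (some p) (some (p + L + 2)))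

-- ===== PRECONDITION & SPEC =====
def Spec_listaTrei (lista : List Int) (out : Option (List Int)) : Prop := out = listaTrei_alt lista
instance (lista : List Int) (out : Option (List Int)) : Decidable (Spec_listaTrei lista out) := by unfold Spec_listaTrei; infer_instance

-- ===== CLAIM (what is proved, stated in full; the proofs are below) =====
def Claim_equal_listaTrei : Prop := ∀ (lista : List Int), Dom_listaTrei lista → Spec_listaTrei lista (listaTrei lista)

-- ===== LEMMAS AND PROOFS =====

-- the window condition at ok-index j (Python index i = j + 2)
def pvCond (lista : List Int) (j : Nat) : Bool :=
  decide (PySem.List.pyGetD lista ((j:Int)+2) 0 = PySem.List.pyGetD lista ((j:Int)+1) 0 ∨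
          PySem.List.pyGetD lista ((j:Int)+2) 0 = PySem.List.pyGetD lista (j:Int) 0 ∨
          PySem.List.pyGetD lista ((j:Int)+1) 0 = PySem.List.pyGetD lista (j:Int) 0)

-- A's loop, re-indexed over ok-indices j = i - 2, abstract in the window condition c
def pvStepA (c : Nat → Bool) (st : Int × Int × Int × Int × Int × Int) (j : Nat) :
    Int × Int × Int × Int × Int × Int :=
  match st with
  | (lg, ml, ist, isp, ixs, _ixo) =>
    if c j then
      if lg + 1 > ml then (lg + 1, lg + 1, ixs, (j:Int)+2, ixs, (j:Int)+2)
      else (lg + 1, ml, ist, isp, ixs, (j:Int)+2)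
    else (2, ml, ist, isp, (j:Int)+1, (j:Int)+2)

def pvFoldA (c : Nat → Bool) (m : Nat) : Int × Int × Int × Int × Int × Int :=
  (List.range m).foldl (pvStepA c) (2, 0, 0, 1, 0, 1)

-- B's run loop over ok-indices, abstract in c
def pvFoldB (c : Nat → Bool) (m : Nat) : List (Int × Int) × Option Int :=
  (List.range m).foldl (fun st (j : Nat) => listaTreiAltStep st ((j:Int), c j)) ([], none)

def pvRunsAll (st : List (Int × Int) × Option Int) (m : Nat) : List (Int × Int) :=
  match st.2 with
  | some s => st.1 ++ [(s, (m:Int) - s)]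
  | none => st.1

def pvBest (rs : List (Int × Int)) : Option (Int × Int) :=
  rs.foldl (fun b r =>
    match b with
    | none => some r
    | some b' => if r.2 > b'.2 then some r else some b') none

def pvInv (m : Nat) (sA : Int × Int × Int × Int × Int × Int) (sB : List (Int × Int) × Option Int) : Prop :=
  match sA with
  | (lg, ml, ist, isp, ixs, ixo) =>
    ixo = (m:Int) + 1 ∧
    (match sB.2 with
     | none => ixs = (m:Int) ∧ lg = 2
     | some s => ixs = s ∧ lg = (m:Int) - s + 2 ∧ 0 ≤ s ∧ s < (m:Int)) ∧
    (match pvBest (pvRunsAll sB m) with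
     | none => ml = 0 ∧ ist = 0 ∧ isp = 1
     | some (p, L) => ml = L + 2 ∧ ist = p ∧ isp = p + L + 1 ∧ 1 ≤ L ∧ 0 ≤ p ∧ p + L ≤ (m:Int))

theorem pvFoldA_succ (c : Nat → Bool) (m : Nat) :
    pvFoldA c (m+1) = pvStepA c (pvFoldA c m) m := by
  simp [pvFoldA, List.range_succ, List.foldl_append]

theorem pvFoldB_succ (c : Nat → Bool) (m : Nat) :
    pvFoldB c (m+1) = listaTreiAltStep (pvFoldB c m) ((m:Int), c m) := by
  simp [pvFoldB, List.range_succ, List.foldl_append]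

theorem pvBest_append' (rs : List (Int × Int)) (a b : Int) :
    pvBest (rs ++ [(a, b)]) = match pvBest rs with
      | none => some (a, b)
      | some b' => if b > b'.2 then some (a, b) else some b' := by
  simp [pvBest, List.foldl_append]

theorem pvCore (c : Nat → Bool) (m : Nat) : pvInv m (pvFoldA c m) (pvFoldB c m) := by
  induction m with
  | zero =>
    simp [pvFoldA, pvFoldB, pvInv, pvRunsAll, pvBest]
  | succ m ih =>
    rw [pvFoldA_succ, pvFoldB_succ]
    rcases hA : pvFoldA c m with ⟨lg, ml, ist, isp, ixs, ixo⟩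
    rcases hB : pvFoldB c m with ⟨runs, start⟩
    rw [hA, hB] at ih
    cases start with
    | none =>
      simp only [pvInv, pvRunsAll] at ih
      obtain ⟨hixo, ⟨hixs, hlg⟩, hbest⟩ := ih
      cases hb : pvBest runs with
      | none =>
        rw [hb] at hbest
        obtain ⟨hml, hist, hisp⟩ := hbest
        cases hc : c m with
        | false =>
          simp only [pvStepA, listaTreiAltStep, hc, Bool.false_eq_true, if_false,
            pvInv, pvRunsAll, hb]
          refine ⟨?_, ⟨?_, ?_⟩, ?_, ?_, ?_⟩ <;> trivial
        | true =>
          have hrec : lg + 1 > ml := by omega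
          simp only [pvStepA, listaTreiAltStep, hc, if_true, if_pos hrec,
            pvInv, pvRunsAll, pvBest_append', hb]
          refine ⟨?_, ⟨?_, ?_, ?_, ?_⟩, ?_, ?_, ?_, ?_, ?_, ?_⟩ <;> first | trivial | omega
      | some pl =>
        rcases pl with ⟨p, L⟩
        rw [hb] at hbest
        obtain ⟨hml, hist, hisp, hL, hp, hpL⟩ := hbest
        cases hc : c m with
        | false =>
          simp only [pvStepA, listaTreiAltStep, hc, Bool.false_eq_true, if_false,
            pvInv, pvRunsAll, hb]
          refine ⟨?_, ⟨?_, ?_⟩, ?_, ?_, ?_, ?_, ?_, ?_⟩ <;> first | trivial | omega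
        | true =>
          have hrec : ¬ (lg + 1 > ml) := by omega
          have hq : ¬ ((↑(m + 1) : Int) - (m : Int) > L) := by push_cast; omega
          simp only [pvStepA, listaTreiAltStep, hc, if_true, if_neg hrec,
            pvInv, pvRunsAll, pvBest_append', hb, if_neg hq]
          refine ⟨?_, ⟨?_, ?_, ?_, ?_⟩, ?_, ?_, ?_, ?_, ?_, ?_⟩ <;> first | trivial | omega
    | some s =>
      simp only [pvInv, pvRunsAll] at ih
      obtain ⟨hixo, ⟨hixs, hlg, hs0, hsm⟩, hbest⟩ := ih
      cases hc : c m with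
      | false =>
        -- run closes: new runsAll list is the same list as the old one
        cases hb : pvBest (runs ++ [(s, (m:Int) - s)]) with
        | none =>
          rw [hb] at hbest
          obtain ⟨hml, hist, hisp⟩ := hbest
          simp only [pvStepA, listaTreiAltStep, hc, Bool.false_eq_true, if_false,
            pvInv, pvRunsAll, hb]
          refine ⟨?_, ⟨?_, ?_⟩, ?_, ?_, ?_⟩ <;> trivial
        | some pl =>
          rcases pl with ⟨p, L⟩
          rw [hb] at hbest
          obtain ⟨hml, hist, hisp, hL, hp, hpL⟩ := hbest
          simp only [pvStepA, listaTreiAltStep, hc, Bool.false_eq_true, if_false,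
            pvInv, pvRunsAll, hb]
          refine ⟨?_, ⟨?_, ?_⟩, ?_, ?_, ?_, ?_, ?_, ?_⟩ <;> first | trivial | omega
      | true =>
        -- run stays open, extended by one
        simp only [pvBest_append'] at hbest
        cases hb0 : pvBest runs with
        | none =>
          rw [hb0] at hbest
          simp only at hbest
          obtain ⟨hml, hist, hisp, hL, hp, hpL⟩ := hbest
          have hrec : lg + 1 > ml := by omega
          simp only [pvStepA, listaTreiAltStep, hc, if_true, if_pos hrec,
            pvInv, pvRunsAll, pvBest_append', hb0]
          refine ⟨?_, ⟨?_, ?_, ?_, ?_⟩, ?_, ?_, ?_, ?_, ?_, ?_⟩ <;> first | trivial | omega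
        | some pl =>
          rcases pl with ⟨p0, L0⟩
          rw [hb0] at hbest
          simp only at hbest
          by_cases hcmp : (m:Int) - s > L0
          · rw [if_pos hcmp] at hbest
            obtain ⟨hml, hist, hisp, hL, hp, hpL⟩ := hbest
            have hrec : lg + 1 > ml := by omega
            have hq : (↑(m + 1) : Int) - s > L0 := by push_cast; omega
            simp only [pvStepA, listaTreiAltStep, hc, if_true, if_pos hrec,
              pvInv, pvRunsAll, pvBest_append', hb0, if_pos hq]
            refine ⟨?_, ⟨?_, ?_, ?_, ?_⟩, ?_, ?_, ?_, ?_, ?_, ?_⟩ <;> first | trivial | omega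
          · rw [if_neg hcmp] at hbest
            obtain ⟨hml, hist, hisp, hL, hp, hpL⟩ := hbest
            by_cases hq : (↑(m + 1) : Int) - s > L0
            · have hrec : lg + 1 > ml := by push_cast at hq; omega
              simp only [pvStepA, listaTreiAltStep, hc, if_true, if_pos hrec,
                pvInv, pvRunsAll, pvBest_append', hb0, if_pos hq]
              refine ⟨?_, ⟨?_, ?_, ?_, ?_⟩, ?_, ?_, ?_, ?_, ?_, ?_⟩ <;> first | trivial | (push_cast at hq; omega)
            · have hrec : ¬ (lg + 1 > ml) := by push_cast at hq; omega
              simp only [pvStepA, listaTreiAltStep, hc, if_true, if_neg hrec,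
                pvInv, pvRunsAll, pvBest_append', hb0, if_neg hq]
              refine ⟨?_, ⟨?_, ?_, ?_, ?_⟩, ?_, ?_, ?_, ?_, ?_, ?_⟩ <;> first | trivial | (push_cast at hq; omega)

-- A's loop body at Python index i = 2 + k equals the re-indexed step at ok-index k
theorem pvStepA_bridge (lista : List Int) (st : Int × Int × Int × Int × Int × Int) (k : Nat) :
    listaTreiStep lista st (2 + (k:Int)) = pvStepA (pvCond lista) st k := by
  rcases st with ⟨lg, ml, ist, isp, ixs, ixo⟩
  have e3 : 2 + (k:Int) = (k:Int) + 2 := by ring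
  have e1 : ((k:Int) + 2) - 1 = (k:Int) + 1 := by ring
  have e2 : ((k:Int) + 2) - 2 = (k:Int) := by ring
  simp only [listaTreiStep, pvStepA, pvCond, decide_eq_true_eq, e3, e1, e2]

theorem pvFoldA_bridge (lista : List Int) :
    (PySem.List.pyRange 2 (lista.length : Int) 1).foldl (listaTreiStep lista) (2, 0, 0, 1, 0, 1)
      = pvFoldA (pvCond lista) (lista.length - 2) := by
  rw [PySem.List.pyRange_one, List.foldl_map]
  have hn : (((lista.length : Int)) - 2).toNat = lista.length - 2 := by omega
  rw [hn]
  unfold pvFoldA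
  exact PySem.List.foldl_congr_mem _ _ _ _ (fun acc x _ => pvStepA_bridge lista acc x)

-- B's window table over the shifted range is the table of pvCond over ok-indices
theorem pvOk_bridge (lista : List Int) :
    ((PySem.List.pyRange 2 (lista.length : Int) 1).map (fun i =>
      decide (PySem.List.pyGetD lista i 0 = PySem.List.pyGetD lista (i-1) 0 ∨
              PySem.List.pyGetD lista i 0 = PySem.List.pyGetD lista (i-2) 0 ∨
              PySem.List.pyGetD lista (i-1) 0 = PySem.List.pyGetD lista (i-2) 0)))
      = (List.range (lista.length - 2)).map (pvCond lista) := by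
  rw [PySem.List.pyRange_one, List.map_map]
  have hn : (((lista.length : Int)) - 2).toNat = lista.length - 2 := by omega
  rw [hn]
  refine List.map_congr_left ?_
  intro k _
  have e3 : 2 + (k:Int) = (k:Int) + 2 := by ring
  have e1 : ((k:Int) + 2) - 1 = (k:Int) + 1 := by ring
  have e2 : ((k:Int) + 2) - 2 = (k:Int) := by ring
  simp only [Function.comp_apply, pvCond, e3, e1, e2]

theorem pvEnum_map_range {α : Type} (g : Nat → α) (m : Nat) :
    PySem.List.enumerate ((List.range m).map g) 0 = (List.range m).map (fun (j : Nat) => ((j:Int), g j)) := by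
  induction m with
  | zero => simp [PySem.List.enumerate_nil]
  | succ m ih =>
    rw [List.range_succ, List.map_append, PySem.List.enumerate_append, ih, List.map_append]
    simp [PySem.List.enumerate_cons, PySem.List.enumerate_nil]

theorem pvFoldB_bridge (lista : List Int) :
    (PySem.List.enumerate ((List.range (lista.length - 2)).map (pvCond lista)) 0).foldl
        listaTreiAltStep ([], none)
      = pvFoldB (pvCond lista) (lista.length - 2) := by
  rw [pvEnum_map_range, List.foldl_map]
  rfl

-- reading out consecutive elements a..b-1 is the slice xs[a:b]
theorem pvMap_pyGetD_eq_slice (xs : List Int) (a b : Int) (h0 : 0 ≤ a) (hab : a ≤ b)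
    (hb : b.toNat ≤ xs.length) :
    (PySem.List.pyRange a b 1).map (fun i => PySem.List.pyGetD xs i 0)
      = PySem.List.slice xs (some a) (some b) := by
  rw [PySem.List.pyRange_one, List.map_map, PySem.List.slice_toNat xs h0 (by omega)]
  refine List.ext_getElem ?_ ?_
  · simp [List.length_take, List.length_drop]
    omega
  · intro k hk1 hk2
    simp only [List.getElem_map, List.getElem_range, Function.comp_apply]
    have hklt : k < (b - a).toNat := by simpa using hk1
    rw [List.getElem_take, List.getElem_drop]
    rw [PySem.List.pyGetD_eq_getElem xs 0 (by omega) (by omega)]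
    have : (a + (k:Int)).toNat = a.toNat + k := by omega
    simp [this]

theorem pvAlt_char (lista : List Int) (h3 : ¬ lista.length < 3) :
    listaTrei_alt lista
      = match pvBest (pvRunsAll (pvFoldB (pvCond lista) (lista.length - 2)) (lista.length - 2)) with
        | none => none
        | some (p, L) => some (PySem.List.slice lista (some p) (some (p + L + 2))) := by
  simp only [listaTrei_alt, h3, if_false]
  rw [pvOk_bridge, pvFoldB_bridge]
  rw [show (List.map (pvCond lista) (List.range (lista.length - 2))).length = lista.length - 2 from by simp]
  rfl

theorem pvEquiv (lista : List Int) : listaTrei lista = listaTrei_alt lista := by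
  by_cases h3 : lista.length < 3
  · simp [listaTrei, listaTrei_alt, h3]
  · have inv := pvCore (pvCond lista) (lista.length - 2)
    rcases hA : pvFoldA (pvCond lista) (lista.length - 2) with ⟨lg, ml, ist, isp, ixs, ixo⟩
    rcases hB : pvFoldB (pvCond lista) (lista.length - 2) with ⟨runs, start⟩
    rw [hA, hB] at inv
    simp only [pvInv] at inv
    obtain ⟨hixo, hstart, hbest⟩ := inv
    rw [pvAlt_char lista h3, hB]
    simp only [listaTrei, h3, if_false]
    rw [pvFoldA_bridge, hA]
    cases hbv : pvBest (pvRunsAll (runs, start) (lista.length - 2)) with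
    | none =>
      rw [hbv] at hbest
      obtain ⟨hml, hist, hisp⟩ := hbest
      have hne : ¬ (ist = -1 ∧ isp = -1) := by omega
      simp only [if_neg hne]
      rw [PySem.List.foldl_append_singleton_eq_map, List.nil_append]
      simp only [List.length_map, PySem.List.length_pyRange_one]
      rw [if_pos (by omega : (isp + 1 - ist).toNat < 3)]
    | some pl =>
      rcases pl with ⟨p, L⟩
      rw [hbv] at hbest
      obtain ⟨hml, hist, hisp, hL, hp, hpL⟩ := hbest
      have hne : ¬ (ist = -1 ∧ isp = -1) := by omega
      simp only [if_neg hne]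
      rw [PySem.List.foldl_append_singleton_eq_map, List.nil_append]
      simp only [List.length_map, PySem.List.length_pyRange_one]
      rw [if_neg (by omega : ¬ (isp + 1 - ist).toNat < 3)]
      have e : isp + 1 = p + L + 2 := by omega
      rw [e, hist]
      exact congrArg some (pvMap_pyGetD_eq_slice lista p (p + L + 2) (by omega) (by omega)
        (by omega))

theorem listaTrei_spec : Claim_equal_listaTrei := by
  intro lista _
  unfold Spec_listaTrei
  exact pvEquiv lista
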